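-- pv_equiv track=rewrite | github.com/sebi06/czitools | src/czitools/metadata_tools.py | get_dimorder
-- ===== SOURCE A (Python) =====
-- from typing import List, Dict, Tuple, Optional, Type, Any, Union, Mapping, Annotated
--
-- def get_dimorder(dim_string: str) -> Tuple[Dict, List, int]:
--     """Get the order of dimensions from dimension string
--
--     :param dim_string: string containing the dimensions
--     :type dim_string: str
--     :return: dims_dict - dictionary with the dimensions and its positions
--     :rtype: dict
--     :return: dimindex_list - list with indices of dimensions
--     :rtype: list
--     :return: numvalid_dims - number of valid dimensions
--     :rtype: integer
--     """
--
--     dimindex_list = []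
--     dims = ["R", "I", "M", "H", "V", "B", "S", "T", "C", "Z", "Y", "X", "A"]
--     dims_dict = {}
--
--     # loop over all dimensions and find the index
--     for d in dims:
--         dims_dict[d] = dim_string.find(d)
--         dimindex_list.append(dim_string.find(d))
--
--     # check if a dimension really exists
--     numvalid_dims = sum(i >= 0 for i in dimindex_list)
--
--     return dims_dict, dimindex_list, numvalid_dims
-- ===== SOURCE B (Python) =====
-- def get_dimorder(dim_string: str):
--     # pre-fill the fixed table with -1, then one left-to-right scan of the
--     # string filling in each dimension's index at its first occurrence
--     dims_dict = dict.fromkeys("RIMHVBSTCZYXA", -1)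
--     for i, ch in enumerate(dim_string):
--         if dims_dict.get(ch, 0) < 0:
--             dims_dict[ch] = i
--     dimindex_list = list(dims_dict.values())
--     numvalid_dims = sum(v >= 0 for v in dimindex_list)
--     return dims_dict, dimindex_list, numvalid_dims
-- ===== Notes on version B (the rewrite author's own statement) =====
-- stated objective: alternative
-- what changed: A scans the string 13 times with str.find (once per fixed dimension); B pre-fills the 13-entry table with -1 and makes a single left-to-right scan of the string, writing each dimension's index into the table at its first occurrence.
import Mathlib
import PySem

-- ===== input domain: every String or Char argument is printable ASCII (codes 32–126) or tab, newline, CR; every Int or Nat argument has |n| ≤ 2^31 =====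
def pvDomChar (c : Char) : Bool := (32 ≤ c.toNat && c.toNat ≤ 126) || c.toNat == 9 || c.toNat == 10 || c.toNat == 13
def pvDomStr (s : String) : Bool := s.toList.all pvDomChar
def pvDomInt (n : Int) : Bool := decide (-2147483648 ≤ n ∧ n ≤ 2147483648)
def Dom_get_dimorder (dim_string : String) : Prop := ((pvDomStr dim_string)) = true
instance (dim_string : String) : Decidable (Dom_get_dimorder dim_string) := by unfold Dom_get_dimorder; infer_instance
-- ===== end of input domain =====

-- B replaces A's 13 str.find scans by one pre-filled -1 table and a single left-to-right scan of the string filling each dimension's first-occurrence index (alternative decomposition, same cost class).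


-- ===== PORT A =====
-- dims = ["R", "I", "M", "H", "V", "B", "S", "T", "C", "Z", "Y", "X", "A"]
def pvDimsA : List String := ["R", "I", "M", "H", "V", "B", "S", "T", "C", "Z", "Y", "X", "A"]

def get_dimorder (dim_string : String) : (List (String × Int)) × List Int × Int :=
  -- for d in dims: dims_dict[d] = dim_string.find(d); dimindex_list.append(dim_string.find(d))
  let st := pvDimsA.foldl
    (fun (p : PySem.Dict String Int × List Int) d =>
      (p.1.insert d (PySem.Str.find dim_string d), p.2 ++ [PySem.Str.find dim_string d]))
    (PySem.Dict.empty, [])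
  -- numvalid_dims = sum(i >= 0 for i in dimindex_list)
  let numvalid := st.2.foldl (fun acc i => acc + (if 0 ≤ i then (1 : Int) else 0)) 0
  (st.1.items, st.2, numvalid)

-- ===== PORT B =====
-- dims_dict = dict.fromkeys("RIMHVBSTCZYXA", -1)
def pvInitB : PySem.Dict String Int :=
  "RIMHVBSTCZYXA".toList.foldl (fun d c => d.insert (String.singleton c) (-1)) PySem.Dict.empty

-- for i, ch in enumerate(dim_string): if dims_dict.get(ch, 0) < 0: dims_dict[ch] = i
def pvScanB (s : List Char) : PySem.Dict String Int :=
  (PySem.List.enumerate s).foldl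
    (fun d p =>
      if d.getD (String.singleton p.2) 0 < 0 then d.insert (String.singleton p.2) p.1 else d)
    pvInitB

def get_dimorder_alt (dim_string : String) : (List (String × Int)) × List Int × Int :=
  let dims_dict := pvScanB dim_string.toList
  -- dimindex_list = list(dims_dict.values())
  let dimindex_list := dims_dict.values
  -- numvalid_dims = sum(v >= 0 for v in dimindex_list)
  let numvalid := dimindex_list.foldl (fun acc v => acc + (if 0 ≤ v then (1 : Int) else 0)) 0
  (dims_dict.items, dimindex_list, numvalid)

-- ===== PRECONDITION & SPEC =====
def Spec_get_dimorder (dim_string : String) (out : (List (String × Int)) × List Int × Int) : Prop := out = get_dimorder_alt dim_string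
instance (dim_string : String) (out : (List (String × Int)) × List Int × Int) : Decidable (Spec_get_dimorder dim_string out) := by unfold Spec_get_dimorder; infer_instance

-- ===== CLAIM (what is proved, stated in full; the proofs are below) =====
def Claim_equal_get_dimorder : Prop := ∀ (dim_string : String), Dom_get_dimorder dim_string → Spec_get_dimorder dim_string (get_dimorder dim_string)

-- ===== LEMMAS AND PROOFS =====

theorem pv_singleton_prefix_iff (c : Char) (l : List Char) : [c] <+: l ↔ l[0]? = some c := by
  constructor
  · rintro ⟨t, rfl⟩; rfl
  · intro h
    cases l with
    | nil => simp at h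
    | cons x t =>
      obtain rfl : x = c := by simpa using h
      exact ⟨t, rfl⟩

theorem pv_find_single (s : List Char) (c : Char) :
    PySem.Chars.find s [c] =
      match s.findIdx? (· == c) with
      | none => -1
      | some k => (k : Int) := by
  by_cases hmem : c ∈ s
  · have hinf : [c] <:+: s := by
      obtain ⟨l, r, rfl⟩ := List.append_of_mem hmem
      exact ⟨l, r, by simp⟩
    have hnn : 0 ≤ PySem.Chars.find s [c] := (PySem.Chars.find_nonneg_iff s [c]).2 hinf
    obtain ⟨hpre, hmin⟩ := PySem.Chars.find_spec hnn
    set n := (PySem.Chars.find s [c]).toNat with hn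
    have hget : s[n]? = some c := by
      have h0 := (pv_singleton_prefix_iff c _).1 hpre
      rw [List.getElem?_drop] at h0
      simpa using h0
    have hlt : n < s.length := (List.getElem?_eq_some_iff.mp hget).1
    have hfi : s.findIdx? (· == c) = some n := by
      rw [List.findIdx?_eq_some_iff_getElem]
      refine ⟨hlt, ?_, ?_⟩
      · have := (List.getElem?_eq_some_iff.mp hget).2
        simp [this]
      · intro j hj
        have hnp := hmin j hj
        rw [pv_singleton_prefix_iff, List.getElem?_drop] at hnp
        intro hpj
        apply hnp
        rw [List.getElem?_eq_getElem (by omega)]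
        simp_all
    rw [hfi]
    simp [hn, Int.toNat_of_nonneg hnn]
  · have h1 : PySem.Chars.find s [c] = -1 := by
      rw [PySem.Chars.find_eq_neg_one_iff]
      intro hinf
      exact hmem (hinf.subset (by simp))
    have h2 : s.findIdx? (· == c) = none := by
      rw [List.findIdx?_eq_none_iff]
      intro x hx
      simp only [beq_eq_false_iff_ne, ne_eq]
      rintro rfl; exact hmem hx
    rw [h1, h2]

-- B's scan loop: final lookup of any singleton key, as a function of the initial dict
theorem pv_scan_get? (s : List Char) (i : Int) (hi : 0 ≤ i) (d : PySem.Dict String Int) (c : Char) :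
    ((PySem.List.enumerate s i).foldl
        (fun d p =>
          if d.getD (String.singleton p.2) 0 < 0 then d.insert (String.singleton p.2) p.1 else d)
        d).get? (String.singleton c) =
      match d.get? (String.singleton c) with
      | none => none
      | some v =>
          if v < 0 then
            (match s.findIdx? (· == c) with
             | none => some v
             | some k => some (i + (k : Int)))
          else some v := by
  induction s generalizing i d with
  | nil =>
    simp [PySem.List.enumerate_nil]
    cases h : d.get? (String.singleton c) with
    | none => simp
    | some v => by_cases hv : v < 0 <;> simp [hv]
  | cons x t ih =>
    rw [PySem.List.enumerate_cons, List.foldl_cons]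
    by_cases hx : x = c
    · subst hx
      cases h : d.get? (String.singleton x) with
      | none =>
        have hD : d.getD (String.singleton x) 0 = 0 := by
          rw [PySem.Dict.getD_eq_get?_getD, h]; rfl
        rw [hD]
        simp only [show ¬((0:Int) < 0) by omega, if_false]
        rw [ih (i+1) (by omega) d, h]
      | some v =>
        have hD : d.getD (String.singleton x) 0 = v := by
          rw [PySem.Dict.getD_eq_get?_getD, h]; rfl
        rw [hD]
        by_cases hv : v < 0
        · rw [if_pos hv, ih (i+1) (by omega)]
          rw [PySem.Dict.get?_insert_self]
          have : ¬(i < 0) := by omega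
          simp only [this, if_false, h, if_pos hv]
          rw [List.findIdx?_cons]
          simp
        · rw [if_neg hv, ih (i+1) (by omega), h]
          simp [hv]
    · have hne : String.singleton c ≠ String.singleton x := by
        intro h
        apply hx
        have hh := congrArg String.toList h
        simp [String.singleton] at hh
        exact hh.symm
      have hstep : (if d.getD (String.singleton x) 0 < 0 then d.insert (String.singleton x) i else d).get?
            (String.singleton c) = d.get? (String.singleton c) := by
        split
        · exact PySem.Dict.get?_insert_of_ne _ _ hne
        · rfl
      rw [ih (i+1) (by omega), hstep, List.findIdx?_cons]
      have hxc : (x == c) = false := by simp [hx]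
      rw [hxc]
      simp only [Bool.false_eq_true, if_false]
      cases d.get? (String.singleton c) with
      | some v =>
        by_cases hv : v < 0
        · simp only [hv, if_true]
          cases t.findIdx? (· == c) with
          | none => rfl
          | some k => simp; omega
        · simp [hv]
      | none => rfl

-- B's scan loop never adds or removes keys
theorem pv_scan_keys (l : List (Int × Char)) (d : PySem.Dict String Int) :
    (l.foldl
        (fun d p =>
          if d.getD (String.singleton p.2) 0 < 0 then d.insert (String.singleton p.2) p.1 else d)
        d).keys = d.keys := by
  induction l generalizing d with
  | nil => rfl
  | cons p t ih =>
    rw [List.foldl_cons, ih]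
    by_cases hc : d.getD (String.singleton p.2) 0 < 0
    · rw [if_pos hc]
      have hcon : d.contains (String.singleton p.2) = true := by
        rw [PySem.Dict.contains_eq_isSome_get?]
        cases h : d.get? (String.singleton p.2) with
        | none =>
          rw [PySem.Dict.getD_eq_get?_getD, h] at hc
          simp at hc
        | some v => rfl
      rw [PySem.Dict.keys_insert_of_contains _ _ hcon]
    · rw [if_neg hc]

theorem pv_scan_getD (s : String) (c : Char) (hc : pvInitB.get? (String.singleton c) = some (-1)) :
    (pvScanB s.toList).getD (String.singleton c) (-1) = PySem.Str.find s (String.singleton c) := by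
  rw [PySem.Dict.getD_eq_get?_getD]
  unfold pvScanB
  rw [pv_scan_get? s.toList 0 (by omega) pvInitB c, hc]
  have hf : PySem.Str.find s (String.singleton c) = PySem.Chars.find s.toList [c] := by
    simp [String.singleton]
  rw [hf, pv_find_single]
  simp only [show ((-1 : Int) < 0) from by omega, if_true]
  cases s.toList.findIdx? (· == c) with
  | none => rfl
  | some k => simp

theorem pv_sum_congr (l l' : List Int) (h : l = l') :
    l.foldl (fun acc i => acc + (if 0 ≤ i then (1 : Int) else 0)) 0 =
      l'.foldl (fun acc v => acc + (if 0 ≤ v then (1 : Int) else 0)) 0 := by rw [h]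

-- ===== VERDICT (by name: the statement is the Claim_ definition above) =====
theorem get_dimorder_spec : Claim_equal_get_dimorder := by
  intro s _
  unfold Spec_get_dimorder
  have hkeys : (pvScanB s.toList).keys = pvDimsA := by
    unfold pvScanB
    rw [pv_scan_keys]
    decide
  have hnodup : (pvScanB s.toList).keys.Nodup := by rw [hkeys]; decide
  have hgetD : ∀ d ∈ pvDimsA, (pvScanB s.toList).getD d (-1) = PySem.Str.find s d := by
    intro d hd
    fin_cases hd
    · exact pv_scan_getD s 'R' (by decide)
    · exact pv_scan_getD s 'I' (by decide)
    · exact pv_scan_getD s 'M' (by decide)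
    · exact pv_scan_getD s 'H' (by decide)
    · exact pv_scan_getD s 'V' (by decide)
    · exact pv_scan_getD s 'B' (by decide)
    · exact pv_scan_getD s 'S' (by decide)
    · exact pv_scan_getD s 'T' (by decide)
    · exact pv_scan_getD s 'C' (by decide)
    · exact pv_scan_getD s 'Z' (by decide)
    · exact pv_scan_getD s 'Y' (by decide)
    · exact pv_scan_getD s 'X' (by decide)
    · exact pv_scan_getD s 'A' (by decide)
  have hBitems : (pvScanB s.toList).items = pvDimsA.map (fun d => (d, PySem.Str.find s d)) := by
    rw [PySem.Dict.items_eq_map_keys _ hnodup (-1), hkeys]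
    exact List.map_congr_left (fun d hd => by rw [hgetD d hd])
  have hBvalues : (pvScanB s.toList).values = pvDimsA.map (fun d => PySem.Str.find s d) := by
    rw [PySem.Dict.values_eq_map_keys _ hnodup (-1), hkeys]
    exact List.map_congr_left (fun d hd => by rw [hgetD d hd])
  have hAitems : (pvDimsA.foldl (fun dct d => dct.insert d (PySem.Str.find s d)) PySem.Dict.empty).items
      = pvDimsA.map (fun d => (d, PySem.Str.find s d)) := by
    have hh := PySem.Dict.items_foldl_insert_fresh pvDimsA (fun d => d) (fun d => PySem.Str.find s d)
      PySem.Dict.empty (by intro a _; simp [PySem.Dict.contains_empty]) (by decide)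
    simpa using hh
  have hlist : pvDimsA.foldl (fun (lst : List Int) d => lst ++ [PySem.Str.find s d]) [] =
      pvDimsA.map (fun d => PySem.Str.find s d) := by
    simpa using PySem.List.foldl_append_singleton_eq_map (l := pvDimsA)
      (f := fun d => PySem.Str.find s d) (acc := ([] : List Int))
  simp only [get_dimorder, get_dimorder_alt]
  rw [PySem.List.foldl_prod_mk
      (f := fun (dct : PySem.Dict String Int) d => dct.insert d (PySem.Str.find s d))
      (g := fun (lst : List Int) d => lst ++ [PySem.Str.find s d])]
  refine Prod.ext ?_ (Prod.ext ?_ ?_)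
  · simp only [hAitems, hBitems]
  · simp only [hlist, hBvalues]
  · exact pv_sum_congr _ _ (by simp only [hlist, hBvalues])
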